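-- pv_equiv track=rewrite | github.com/asweigart/codebreaker | generatePatterns.py | getWordPattern
-- ===== SOURCE A (Python) =====
-- def getWordPattern(word):
--     word = word.upper()
--     nextNum = 0
--     letterNums = {}
--     wordPattern = []
--
--     for letter in word:
--         if letter in letterNums:
--             wordPattern.append(str(letterNums[letter]))
--         else:
--             wordPattern.append(str(nextNum))
--             letterNums[letter] = nextNum
--             nextNum += 1
--     return '.'.join(wordPattern)
-- ===== SOURCE B (Python) =====
-- def getWordPattern(word):
--     # The pattern number of a letter is the count of distinct letters that
--     # appear strictly before its first occurrence. Compute it per character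
--     # by brute force: no dict, no counter, no mutable state.
--     letters = list(word.upper())
--     return '.'.join(str(len(set(letters[:letters.index(c)]))) for c in letters)
-- ===== Notes on version B (the rewrite author's own statement) =====
-- stated objective: alternative
-- what changed: Replaces A's single stateful pass (a dict of seen letters plus a nextNum counter, branching per character) by a stateless brute-force rule: each letter's number is recomputed independently as the count of distinct letters before its first occurrence, len(set(letters[:letters.index(c)])) - no dict, no counter, quadratic instead of linear.
import Mathlib
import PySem

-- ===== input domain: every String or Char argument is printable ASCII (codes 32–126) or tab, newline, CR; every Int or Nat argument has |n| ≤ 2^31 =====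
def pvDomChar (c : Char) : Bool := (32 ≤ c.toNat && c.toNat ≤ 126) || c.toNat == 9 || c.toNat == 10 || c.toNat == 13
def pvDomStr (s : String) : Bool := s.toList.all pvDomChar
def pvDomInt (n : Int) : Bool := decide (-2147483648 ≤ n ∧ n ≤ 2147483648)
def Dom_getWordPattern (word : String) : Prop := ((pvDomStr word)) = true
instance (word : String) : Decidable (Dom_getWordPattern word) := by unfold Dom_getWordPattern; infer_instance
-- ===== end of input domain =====

-- B drops A's stateful dict-and-counter pass: each letter's number is recomputed
-- independently as the count of distinct letters before its first occurrence
-- (objective: alternative, stateless brute force; no speed claim).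

-- ===== PORT A =====
-- A's single loop over the upper-cased word, carrying (nextNum, letterNums, wordPattern).
-- `letterNums[letter]` is only evaluated under the `letter in letterNums` test, so the
-- total lookup `getD … 0` is exact (no KeyError is reachable).
def getWordPattern (word : String) : String :=
  let w := PySem.Str.upper word
  let st := w.toList.foldl
    (fun (s : Int × PySem.Dict Char Int × List String) letter =>
      let (nextNum, letterNums, wordPattern) := s
      if letterNums.contains letter then
        (nextNum, letterNums, wordPattern ++ [PySem.Int.toStr (letterNums.getD letter 0)])
      else
        (nextNum + 1, letterNums.insert letter nextNum,
         wordPattern ++ [PySem.Int.toStr nextNum]))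
    ((0 : Int), PySem.Dict.empty, ([] : List String))
  PySem.Str.join "." st.2.2

-- ===== PORT B =====
-- letters = list(word.upper()); per character c: len(set(letters[:letters.index(c)])).
-- `letters.index(c)` is only called with c drawn from letters, so the ValueError branch
-- of index (none) is unreachable and `getD 0` is exact.
def getWordPattern_alt (word : String) : String :=
  let letters := (PySem.Str.upper word).toList
  PySem.Str.join "."
    (letters.map (fun c =>
      PySem.Int.toStr
        ((PySem.Set.len (PySem.Set.ofList
            (PySem.List.slice letters none
              (some (((PySem.List.index? letters c).getD 0 : Nat) : Int)))) : Int))))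

-- ===== PRECONDITION & SPEC =====
def Spec_getWordPattern (word : String) (out : String) : Prop := out = getWordPattern_alt word
instance (word : String) (out : String) : Decidable (Spec_getWordPattern word out) := by unfold Spec_getWordPattern; infer_instance

-- ===== CLAIM (what is proved, stated in full; the proofs are below) =====
def Claim_equal_getWordPattern : Prop := ∀ (word : String), Dom_getWordPattern word → Spec_getWordPattern word (getWordPattern word)

-- ===== LEMMAS AND PROOFS =====

-- The pairs (character, its index) of a list, with Int indices.
def pvIdxPairs (u : List Char) : List (Char × Int) :=
  u.zipIdx.map (fun p => (p.1, (p.2 : Int)))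

theorem pvIdxPairs_append_singleton (u : List Char) (c : Char) :
    pvIdxPairs (u ++ [c]) = pvIdxPairs u ++ [(c, (u.length : Int))] := by
  simp [pvIdxPairs, List.zipIdx_append]

theorem pvMapFst_idxPairs (u : List Char) : (pvIdxPairs u).map Prod.fst = u := by
  simp [pvIdxPairs]
  exact List.zipIdx_map_fst 0 u

theorem pvFind?_eq_none (l : List (Char × Int)) (c : Char) (h : c ∉ l.map Prod.fst) :
    l.find? (fun p => p.1 == c) = none := by
  rw [List.find?_eq_none]
  intro p hp
  simp only [beq_iff_eq]
  intro hpc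
  exact h (hpc ▸ List.mem_map_of_mem hp)

theorem pvGetD_append_mem (l t : List (Char × Int)) (c : Char) (h : c ∈ l.map Prod.fst) :
    (PySem.Dict.mk (l ++ t)).getD c 0 = (PySem.Dict.mk l).getD c 0 := by
  obtain ⟨p, hp, hpc⟩ := List.mem_map.mp h
  have hs : (l.find? (fun p => p.1 == c)).isSome := by
    rw [List.find?_isSome]
    exact ⟨p, hp, by simp [hpc]⟩
  simp [PySem.Dict.getD, PySem.Dict.get?, List.find?_append,
    Option.or_of_isSome hs]

theorem pvGetD_append_fresh (l : List (Char × Int)) (c : Char) (v : Int)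
    (h : c ∉ l.map Prod.fst) :
    (PySem.Dict.mk (l ++ [(c, v)])).getD c 0 = v := by
  simp [PySem.Dict.getD, PySem.Dict.get?, List.find?_append, pvFind?_eq_none l c h]

theorem pvContains_mk (l : List (Char × Int)) (c : Char) :
    (PySem.Dict.mk l).contains c = decide (c ∈ l.map Prod.fst) := by
  rw [Bool.eq_iff_iff]
  simp only [PySem.Dict.contains, List.any_eq_true, List.mem_map, decide_eq_true_eq,
    beq_iff_eq]

theorem pvGetD_idxPairs (u : List Char) (c : Char) (h : c ∈ u) :
    (PySem.Dict.mk (pvIdxPairs u)).getD c 0 = (u.idxOf c : Int) := by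
  induction u using List.reverseRecOn with
  | nil => simp at h
  | append_singleton u x ih =>
      rw [pvIdxPairs_append_singleton]
      by_cases hc : c ∈ u
      · rw [pvGetD_append_mem _ _ _ (by rw [pvMapFst_idxPairs]; exact hc), ih hc,
          List.idxOf_append_of_mem hc]
      · have hcx : c = x := by
          rcases List.mem_append.mp h with h1 | h1
          · exact absurd h1 hc
          · simpa using h1
        subst hcx
        rw [pvGetD_append_fresh _ _ _ (by rw [pvMapFst_idxPairs]; exact hc),
          List.idxOf_append_of_notMem hc]
        simp

theorem pvDedup_append_singleton (l : List Char) (c : Char) :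
    PySem.List.dedup (l ++ [c])
      = if c ∈ PySem.List.dedup l then PySem.List.dedup l else PySem.List.dedup l ++ [c] := by
  simp only [PySem.List.dedup, PySem.Set.ofList, List.foldl_append, List.foldl_cons,
    List.foldl_nil, PySem.Set.add, PySem.Set.contains]
  by_cases h : c ∈ List.foldl PySem.Set.add PySem.Set.empty l
  · simp only [if_pos h, if_pos (List.elem_eq_true_of_mem h)]
  · simp only [if_neg h]
    rw [if_neg (fun he => h (List.mem_of_elem_eq_true he))]

-- A's loop invariant: after the whole list, nextNum is the number of distinct letters,
-- letterNums is the first-occurrence index table, and the pattern maps each letter to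
-- its index in the deduplicated list.
theorem pvFoldA (l : List Char) :
    l.foldl
      (fun (s : Int × PySem.Dict Char Int × List String) letter =>
        let (nextNum, letterNums, wordPattern) := s
        if letterNums.contains letter then
          (nextNum, letterNums, wordPattern ++ [PySem.Int.toStr (letterNums.getD letter 0)])
        else
          (nextNum + 1, letterNums.insert letter nextNum,
           wordPattern ++ [PySem.Int.toStr nextNum]))
      ((0 : Int), PySem.Dict.empty, ([] : List String))
    = (((PySem.List.dedup l).length : Int),
       PySem.Dict.mk (pvIdxPairs (PySem.List.dedup l)),
       l.map (fun c => PySem.Int.toStr (((PySem.List.dedup l).idxOf c : Int)))) := by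
  induction l using List.reverseRecOn with
  | nil => simp [PySem.List.dedup, PySem.Set.ofList, pvIdxPairs, PySem.Dict.empty]
  | append_singleton l x ih =>
      rw [List.foldl_append, ih, pvDedup_append_singleton]
      by_cases hx : x ∈ PySem.List.dedup l
      · simp only [if_pos hx, List.foldl_cons, List.foldl_nil]
        rw [if_pos (by rw [pvContains_mk, pvMapFst_idxPairs]; exact decide_eq_true hx)]
        simp only [List.map_append, List.map_cons, List.map_nil]
        rw [pvGetD_idxPairs _ _ hx]
      · simp only [if_neg hx, List.foldl_cons, List.foldl_nil]
        rw [if_neg (fun hd => hx (by rw [pvContains_mk, pvMapFst_idxPairs] at hd; exact of_decide_eq_true hd))]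
        have hins : (PySem.Dict.mk (pvIdxPairs (PySem.List.dedup l))).insert x
              ((PySem.List.dedup l).length : Int)
            = PySem.Dict.mk (pvIdxPairs (PySem.List.dedup l ++ [x])) := by
          apply PySem.Dict.ext
          rw [PySem.Dict.items_insert_of_not_contains _ _
            (by rw [pvContains_mk, pvMapFst_idxPairs]; exact decide_eq_false hx),
            pvIdxPairs_append_singleton]
        refine Prod.ext (by simp) (Prod.ext ?_ ?_)
        · simpa using hins
        · simp only [List.map_append, List.map_cons, List.map_nil]
          congr 1
          · apply List.map_congr_left
            intro c hc
            have hcd : c ∈ PySem.List.dedup l := (PySem.List.mem_dedup l c).mpr hc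
            rw [List.idxOf_append_of_mem hcd]
          · rw [List.idxOf_append_of_notMem hx]
            simp

-- Folding Set.add over any tail only APPENDS fresh elements.
theorem pvFoldAdd_append (ys : List Char) (t : PySem.Set Char) :
    ∃ s : List Char, List.foldl PySem.Set.add t ys = t ++ s := by
  induction ys generalizing t with
  | nil => exact ⟨[], by simp⟩
  | cons y ys ih =>
      simp only [List.foldl_cons, PySem.Set.add, PySem.Set.contains]
      by_cases hy : List.contains t y = true
      · rw [if_pos hy]
        exact ih t
      · rw [if_neg hy]
        obtain ⟨s, hs⟩ := ih (t ++ [y])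
        exact ⟨y :: s, by rw [hs]; simp⟩

-- The key bridge: for c ∈ l, A's first-occurrence index of c in dedup l equals
-- B's count of distinct letters in the prefix before c's first occurrence in l.
theorem pvIdxOf_dedup_eq_len_prefix (l : List Char) (c : Char) (h : c ∈ l) :
    ((PySem.List.dedup l).idxOf c : Int)
      = ((PySem.List.dedup (l.take (((PySem.List.index? l c).getD 0 : Nat)))).length : Int) := by
  obtain ⟨k, hk⟩ := Option.isSome_iff_exists.mp ((PySem.List.index?_isSome_iff l c).mpr h)
  obtain ⟨pre, suf, hl, hlen, hpre⟩ := (PySem.List.index?_eq_some_iff l c k).mp hk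
  have htake : l.take (((PySem.List.index? l c).getD 0 : Nat)) = pre := by
    rw [hk]; subst hl hlen; simp
  rw [htake]
  have hnd : c ∉ PySem.List.dedup pre := fun hc => hpre ((PySem.List.mem_dedup pre c).mp hc)
  have hdl : ∃ s, PySem.List.dedup l = (PySem.List.dedup pre ++ [c]) ++ s := by
    subst hl
    have : PySem.List.dedup (pre ++ c :: suf)
        = List.foldl PySem.Set.add (PySem.Set.add (PySem.List.dedup pre) c) suf := by
      simp [PySem.List.dedup, PySem.Set.ofList, List.foldl_append]
    rw [this]
    have hadd : PySem.Set.add (PySem.List.dedup pre) c = PySem.List.dedup pre ++ [c] := by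
      simp only [PySem.Set.add, PySem.Set.contains]
      rw [if_neg (fun he => hnd (List.mem_of_elem_eq_true he))]
    rw [hadd]
    exact pvFoldAdd_append suf _
  obtain ⟨s, hs⟩ := hdl
  rw [hs, List.append_assoc, List.idxOf_append_of_notMem hnd]
  simp

-- ===== VERDICT (by name: the statement is the Claim_ definition above) =====
theorem getWordPattern_spec : Claim_equal_getWordPattern := by
  intro word _
  show getWordPattern word = getWordPattern_alt word
  simp only [getWordPattern, getWordPattern_alt]
  rw [pvFoldA]
  refine congrArg (PySem.Str.join ".") ?_
  apply List.map_congr_left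
  intro c hc
  rw [PySem.List.slice_to_natCast]
  refine congrArg PySem.Int.toStr ?_
  simpa [PySem.Set.len, PySem.List.dedup] using
    pvIdxOf_dedup_eq_len_prefix (PySem.Str.upper word).toList c hc
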